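-- pv_equiv track=rewrite | github.com/KOPFYF/LCEveryday | Graph/BFS/countSubgraphsForEachDiameter1617.py | countSubgraphsForEachDiameter
-- ===== SOURCE A (Python) =====
-- def countSubgraphsForEachDiameter(n, edges):
--     def maxDistance(state):  # return: maximum distance between any two cities in our subset. O(n^2)
--         cntEdge, cntCity, maxDist = 0, 0, 0
--         for i in range(n):
--             if (state >> i) & 1 == 0: continue # Skip if city `i` not in our subset
--             cntCity += 1
--             for j in range(i + 1, n):
--                 if (state >> j) & 1 == 0: continue # Skip if city `j` not in our subset
--                 cntEdge += dist[i][j] == 1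
--                 maxDist = max(maxDist, dist[i][j])
--         if cntEdge != cntCity - 1: return 0 # Subset form an invalid subtree!
--         return maxDist
--
--     INF = n # Since cities form a tree so maximum distance between 2 cities always < n
--     dist = [[INF] * n for _ in range(n)]
--     for u, v in edges:
--         dist[u-1][v-1] = dist[v-1][u-1] = 1
--
--     for k in range(n):
--         for i in range(n):
--             for j in range(n):
--                 dist[i][j] = min(dist[i][j], dist[i][k] + dist[k][j])
--
--     ans = [0] * (n - 1)
--     for state in range(1, 2**n):
--         d = maxDistance(state)
--         if d > 0: ans[d - 1] += 1
--     return ans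
-- ===== SOURCE B (Python) =====
-- def countSubgraphsForEachDiameter(n, edges):
--     # all-pairs shortest distances (Floyd-Warshall), as in the problem setup
--     INF = n
--     dist = [[INF] * n for _ in range(n)]
--     for u, v in edges:
--         dist[u-1][v-1] = dist[v-1][u-1] = 1
--     for k in range(n):
--         for i in range(n):
--             for j in range(n):
--                 dist[i][j] = min(dist[i][j], dist[i][k] + dist[k][j])
--
--     # Recursive include/exclude search over vertices n-1, n-2, ..., 0 carrying the
--     # chosen vertices with their induced edge count and max pairwise distance as
--     # incremental accumulators: each vertex pays only for its pairs with the vertices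
--     # already chosen, so no subset is ever rescanned.
--     ans = [0] * (n - 1)
--
--     def go(v, chosen, e, m):
--         # chosen: already-taken vertices (all > v, ascending); e = #induced edges,
--         # m = max pairwise distance among chosen
--         if v < 0:
--             if m > 0 and e == len(chosen) - 1:
--                 ans[m-1] += 1
--             return
--         go(v - 1, chosen, e, m)           # skip v
--         e2, m2 = e, m
--         for j in chosen:
--             if dist[v][j] == 1: e2 += 1
--             if dist[v][j] > m2: m2 = dist[v][j]
--         go(v - 1, [v] + chosen, e2, m2)   # take v
--
--     go(n - 1, [], 0, 0)
--     return ans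
-- ===== Notes on version B (the rewrite author's own statement) =====
-- stated objective: alternative
-- what changed: B replaces A's flat loop over all 2^n bitmask states with an O(n^2) pairwise rescan per state (the maxDistance helper) by a recursive include/exclude search over the vertices that carries the chosen set, its induced edge count and its max pairwise distance as incremental accumulators, so each vertex pays only for its pairs with the already-chosen vertices and no subset is ever rescanned; the Floyd-Warshall distance setup is kept.
-- outside the precondition, e.g. on countSubgraphsForEachDiameter(3, [(1, 2), (2, 3), (1, 3)]): A returns [3, 0], B returns [3, 0]
import Mathlib
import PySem

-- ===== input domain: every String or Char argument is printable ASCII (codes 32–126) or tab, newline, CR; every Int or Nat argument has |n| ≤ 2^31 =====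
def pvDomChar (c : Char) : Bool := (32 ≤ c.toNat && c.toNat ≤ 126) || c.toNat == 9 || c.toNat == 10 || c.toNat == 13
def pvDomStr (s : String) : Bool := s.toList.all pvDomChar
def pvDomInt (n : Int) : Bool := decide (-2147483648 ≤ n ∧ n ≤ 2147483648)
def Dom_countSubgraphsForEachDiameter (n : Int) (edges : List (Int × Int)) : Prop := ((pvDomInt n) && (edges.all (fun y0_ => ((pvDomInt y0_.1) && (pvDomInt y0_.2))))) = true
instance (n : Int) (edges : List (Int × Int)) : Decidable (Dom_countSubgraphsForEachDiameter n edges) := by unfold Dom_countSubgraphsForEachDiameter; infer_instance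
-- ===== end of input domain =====

-- B keeps A's Floyd–Warshall distance setup but replaces the flat loop over all 2^n
-- bitmask states with an O(n^2) pairwise rescan per state by a recursive include/exclude
-- search over the vertices carrying (chosen set, induced edge count, max pairwise
-- distance) as incremental accumulators, so no subset is ever rescanned
-- (objective: alternative — each vertex pays only for its pairs with the chosen set).

-- ===== PORT A =====
def pvDistA (n : Int) (edges : List (Int × Int)) : List (List Int) :=
  -- INF = n; dist = [[INF] * n for _ in range(n)]
  let dist : List (List Int) := (PySem.List.pyRange 0 n 1).map (fun _ => PySem.List.pyRepeat [n] n)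
  -- for u, v in edges: dist[u-1][v-1] = dist[v-1][u-1] = 1  (left-to-right assignment)
  let dist := edges.foldl (fun d e =>
    let d := PySem.List.pySetD d (e.1 - 1) (PySem.List.pySetD (PySem.List.pyGetD d (e.1 - 1) []) (e.2 - 1) 1)
    PySem.List.pySetD d (e.2 - 1) (PySem.List.pySetD (PySem.List.pyGetD d (e.2 - 1) []) (e.1 - 1) 1)) dist
  -- triple Floyd–Warshall loop
  (PySem.List.pyRange 0 n 1).foldl (fun d k =>
    (PySem.List.pyRange 0 n 1).foldl (fun d i =>
      (PySem.List.pyRange 0 n 1).foldl (fun d j =>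
        PySem.List.pySetD d i (PySem.List.pySetD (PySem.List.pyGetD d i []) j
          (min (PySem.List.pyGetD (PySem.List.pyGetD d i []) j 0)
               (PySem.List.pyGetD (PySem.List.pyGetD d i []) k 0 +
                PySem.List.pyGetD (PySem.List.pyGetD d k []) j 0)))) d) d) dist

-- maxDistance(state): `(state >> i) & 1` is computed on Nat; exact, since every state and
-- index this port feeds in is nonnegative (states come from range(1, 2**n), indices from range(n)).
def pvMaxDistance (n : Int) (dist : List (List Int)) (state : Int) : Int :=
  let r := (PySem.List.pyRange 0 n 1).foldl (fun (acc : Int × Int × Int) i =>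
      if ((state.toNat >>> i.toNat) &&& 1 == 0) then acc
      else
        (PySem.List.pyRange (i + 1) n 1).foldl (fun (a2 : Int × Int × Int) j =>
          if ((state.toNat >>> j.toNat) &&& 1 == 0) then a2
          else (a2.1 + (if PySem.List.pyGetD (PySem.List.pyGetD dist i []) j 0 = 1 then 1 else 0),
                a2.2.1,
                max a2.2.2 (PySem.List.pyGetD (PySem.List.pyGetD dist i []) j 0)))
          (acc.1, acc.2.1 + 1, acc.2.2)) ((0 : Int), (0 : Int), (0 : Int))
  if r.1 ≠ r.2.1 - 1 then 0 else r.2.2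

def countSubgraphsForEachDiameter (n : Int) (edges : List (Int × Int)) : List Int :=
  let dist := pvDistA n edges
  let ans := PySem.List.pyRepeat [0] (n - 1)
  (PySem.List.pyRange 1 ((2 : Int) ^ n.toNat) 1).foldl (fun ans state =>
    let d := pvMaxDistance n dist state
    if d > 0 then PySem.List.pySetD ans (d - 1) (PySem.List.pyGetD ans (d - 1) 0 + 1) else ans) ans

-- ===== PORT B =====
def pvDistB (n : Int) (edges : List (Int × Int)) : List (List Int) :=
  let dist : List (List Int) := (PySem.List.pyRange 0 n 1).map (fun _ => PySem.List.pyRepeat [n] n)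
  let dist := edges.foldl (fun d e =>
    let d := PySem.List.pySetD d (e.1 - 1) (PySem.List.pySetD (PySem.List.pyGetD d (e.1 - 1) []) (e.2 - 1) 1)
    PySem.List.pySetD d (e.2 - 1) (PySem.List.pySetD (PySem.List.pyGetD d (e.2 - 1) []) (e.1 - 1) 1)) dist
  (PySem.List.pyRange 0 n 1).foldl (fun d k =>
    (PySem.List.pyRange 0 n 1).foldl (fun d i =>
      (PySem.List.pyRange 0 n 1).foldl (fun d j =>
        PySem.List.pySetD d i (PySem.List.pySetD (PySem.List.pyGetD d i []) j
          (min (PySem.List.pyGetD (PySem.List.pyGetD d i []) j 0)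
               (PySem.List.pyGetD (PySem.List.pyGetD d i []) k 0 +
                PySem.List.pyGetD (PySem.List.pyGetD d k []) j 0)))) d) d) dist

-- Source B's recursion `go(v, chosen, e, m)` on the integer vertex v down to -1; ported with
-- v+1 as the structural (fuel) argument, exact since go is only called with v ≥ -1.
-- `ans` is threaded as an explicit argument (Python mutates the closed-over list).
def pvGo (dist : List (List Int)) : Nat → List Int → Int → Int → List Int → List Int
  | 0, chosen, e, m, ans =>
      -- v < 0: leaf
      if m > 0 ∧ e = (chosen.length : Int) - 1 then
        PySem.List.pySetD ans (m - 1) (PySem.List.pyGetD ans (m - 1) 0 + 1)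
      else ans
  | vp + 1, chosen, e, m, ans =>
      let v : Int := (vp : Int)
      let ans := pvGo dist vp chosen e m ans      -- skip v
      let r := chosen.foldl (fun (p : Int × Int) j =>
        (p.1 + (if PySem.List.pyGetD (PySem.List.pyGetD dist v []) j 0 = 1 then 1 else 0),
         if PySem.List.pyGetD (PySem.List.pyGetD dist v []) j 0 > p.2 then
           PySem.List.pyGetD (PySem.List.pyGetD dist v []) j 0 else p.2)) (e, m)
      pvGo dist vp (v :: chosen) r.1 r.2 ans      -- take v

def countSubgraphsForEachDiameter_alt (n : Int) (edges : List (Int × Int)) : List Int :=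
  let dist := pvDistB n edges
  let ans := PySem.List.pyRepeat [0] (n - 1)
  pvGo dist n.toNat [] 0 0 ans

-- ===== PRECONDITION & SPEC =====
-- the distinct undirected edges of the simple graph, as normalized 0-based index pairs
-- (min, max); a label u with 1-n <= u <= 0 addresses row (u-1) mod n via Python's
-- negative-index wraparound, so labels are reduced mod n; self-loops are dropped
def pvPairs (n : Int) (edges : List (Int × Int)) : List (Int × Int) :=
  PySem.List.dedup
    ((edges.filter (fun e => PySem.Int.mod (e.1 - 1) n != PySem.Int.mod (e.2 - 1) n)).map
      (fun e => (min (PySem.Int.mod (e.1 - 1) n) (PySem.Int.mod (e.2 - 1) n),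
                 max (PySem.Int.mod (e.1 - 1) n) (PySem.Int.mod (e.2 - 1) n))))

-- the graph is a forest: every nonempty set of distinct edges spans more vertices than edges
def pvForest (n : Int) (edges : List (Int × Int)) : Prop :=
  ∀ S ∈ (pvPairs n edges).sublists, S ≠ [] →
    (S.length : Int) < ((PySem.List.dedup (S.map Prod.fst ++ S.map Prod.snd)).length : Int)

-- Pre_ excludes non-forest inputs: on those A either raises IndexError (a diameter can
-- reach n-1+1) or counts subsets by an accidental distance matrix; labels stay in Python's
-- in-range window [1-n, n].
def Pre_countSubgraphsForEachDiameter (n : Int) (edges : List (Int × Int)) : Prop :=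
  0 ≤ n ∧ (∀ e ∈ edges, 1 - n ≤ e.1 ∧ e.1 ≤ n ∧ 1 - n ≤ e.2 ∧ e.2 ≤ n) ∧
    pvForest n edges

instance (n : Int) (edges : List (Int × Int)) : Decidable (Pre_countSubgraphsForEachDiameter n edges) := by
  unfold Pre_countSubgraphsForEachDiameter pvForest; infer_instance

def pvWitness_countSubgraphsForEachDiameter : Int × (List (Int × Int)) := (3, [(1, 2), (2, 3)])

def Spec_countSubgraphsForEachDiameter (n : Int) (edges : List (Int × Int)) (out : List Int) : Prop := out = countSubgraphsForEachDiameter_alt n edges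
instance (n : Int) (edges : List (Int × Int)) (out : List Int) : Decidable (Spec_countSubgraphsForEachDiameter n edges out) := by unfold Spec_countSubgraphsForEachDiameter; infer_instance

-- ===== CLAIM (what is proved, stated in full; the proofs are below) =====
def Claim_equal_countSubgraphsForEachDiameter : Prop := ∀ (n : Int) (edges : List (Int × Int)), Dom_countSubgraphsForEachDiameter n edges → Pre_countSubgraphsForEachDiameter n edges → Spec_countSubgraphsForEachDiameter n edges (countSubgraphsForEachDiameter n edges)

-- ===== LEMMAS AND PROOFS =====

theorem pvDist_eq (n : Int) (edges : List (Int × Int)) : pvDistA n edges = pvDistB n edges := rfl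

-- ---- A-side characterisation (per-state pairwise scan) ----

-- the `while rest:` style head/tail pair scan over a member list (A's pair enumeration order)
def pvPairScan (dist : List (List Int)) : List Int → Int × Int → Int × Int
  | [], acc => acc
  | i :: rest, acc =>
      pvPairScan dist rest
        (rest.foldl (fun (a2 : Int × Int) j =>
          (a2.1 + (if PySem.List.pyGetD (PySem.List.pyGetD dist i []) j 0 = 1 then 1 else 0),
           max a2.2 (PySem.List.pyGetD (PySem.List.pyGetD dist i []) j 0))) acc)

-- members of a bitmask state, as the ascending list of set bit positions below n
def pvMembers (n : Int) (s : Nat) : List Int :=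
  (PySem.List.pyRange 0 n 1).filter (fun i => s.testBit i.toNat)

-- `if (state >> i) & 1 == 0: continue` tests exactly `testBit`
theorem pvBit_eq (s i : Nat) : (!((s >>> i) &&& 1 == 0)) = s.testBit i := by
  simp only [Nat.testBit, Nat.and_comm, bne]

-- skip-style loop = fold over the filtered list
theorem pvFoldl_skip {α β : Type} (p : α → Bool) (f : β → α → β) (l : List α) (init : β) :
    l.foldl (fun acc x => if p x then acc else f acc x) init
      = (l.filter (fun x => !p x)).foldl f init := by
  induction l generalizing init with
  | nil => rfl
  | cons a l ih => by_cases h : p a <;> simp [h, ih]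

-- a triple fold whose middle component is never touched is the pair fold
theorem pvFoldl_mid {α : Type} (f1 : Int → α → Int) (f2 : Int → α → Int) (l : List α)
    (c cc m : Int) :
    l.foldl (fun (t : Int × Int × Int) j => (f1 t.1 j, t.2.1, f2 t.2.2 j)) (c, cc, m)
      = ((l.foldl (fun (p : Int × Int) j => (f1 p.1 j, f2 p.2 j)) (c, m)).1, cc,
         (l.foldl (fun (p : Int × Int) j => (f1 p.1 j, f2 p.2 j)) (c, m)).2) := by
  induction l generalizing c cc m with
  | nil => rfl
  | cons a l ih => simpa using ih (f1 c a) cc (f2 m a)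

-- if filtering a range yields i :: rest, then rest is the filtered tail above i
theorem pvFilter_range_cons (n : Int) (bit : Int → Bool) :
    ∀ (k : Nat) (a i : Int) (rest : List Int), (n - a).toNat = k →
      (PySem.List.pyRange a n 1).filter bit = i :: rest →
      rest = (PySem.List.pyRange (i + 1) n 1).filter bit := by
  intro k
  induction k with
  | zero =>
    intro a i rest hk h
    rw [PySem.List.pyRange_one_eq_nil (by omega)] at h
    simp at h
  | succ k ih =>
    intro a i rest hk h
    have ha : a < n := by omega
    rw [PySem.List.pyRange_one_cons ha] at h
    by_cases hb : bit a
    · rw [List.filter_cons_of_pos hb] at h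
      obtain ⟨rfl, rfl⟩ := List.cons.inj h
      rfl
    · rw [List.filter_cons_of_neg (by simp [hb])] at h
      exact ih (a + 1) i rest (by omega) h

-- A's inner double loop over a filtered-range member list equals the head/tail pair scan
theorem pvScan_eq (n : Int) (dist : List (List Int)) (s : Nat) :
    ∀ (ms : List Int) (a : Int),
      ms = (PySem.List.pyRange a n 1).filter (fun i => s.testBit i.toNat) →
      ∀ (c cc m : Int),
      ms.foldl (fun (acc : Int × Int × Int) i =>
        (PySem.List.pyRange (i + 1) n 1).foldl (fun (a2 : Int × Int × Int) j =>
          if ((s >>> j.toNat) &&& 1 == 0) then a2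
          else (a2.1 + (if PySem.List.pyGetD (PySem.List.pyGetD dist i []) j 0 = 1 then 1 else 0),
                a2.2.1,
                max a2.2.2 (PySem.List.pyGetD (PySem.List.pyGetD dist i []) j 0)))
          (acc.1, acc.2.1 + 1, acc.2.2)) (c, cc, m)
      = ((pvPairScan dist ms (c, m)).1, cc + ms.length, (pvPairScan dist ms (c, m)).2) := by
  intro ms
  induction ms with
  | nil => intro a _ c cc m; simp [pvPairScan]
  | cons i rest ih =>
    intro a hms c cc m
    have hrest : rest = (PySem.List.pyRange (i + 1) n 1).filter (fun i => s.testBit i.toNat) :=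
      pvFilter_range_cons n _ (n - a).toNat a i rest rfl hms.symm
    rw [List.foldl_cons]
    have hinner : ∀ (c' cc' m' : Int),
        (PySem.List.pyRange (i + 1) n 1).foldl (fun (a2 : Int × Int × Int) j =>
          if ((s >>> j.toNat) &&& 1 == 0) then a2
          else (a2.1 + (if PySem.List.pyGetD (PySem.List.pyGetD dist i []) j 0 = 1 then 1 else 0),
                a2.2.1,
                max a2.2.2 (PySem.List.pyGetD (PySem.List.pyGetD dist i []) j 0))) (c', cc', m')
        = ((rest.foldl (fun (p : Int × Int) j =>
              (p.1 + (if PySem.List.pyGetD (PySem.List.pyGetD dist i []) j 0 = 1 then 1 else 0),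
               max p.2 (PySem.List.pyGetD (PySem.List.pyGetD dist i []) j 0))) (c', m')).1, cc',
           (rest.foldl (fun (p : Int × Int) j =>
              (p.1 + (if PySem.List.pyGetD (PySem.List.pyGetD dist i []) j 0 = 1 then 1 else 0),
               max p.2 (PySem.List.pyGetD (PySem.List.pyGetD dist i []) j 0))) (c', m')).2) := by
      intro c' cc' m'
      rw [pvFoldl_skip]
      have hfilter : (PySem.List.pyRange (i + 1) n 1).filter
            (fun x => !((s >>> x.toNat) &&& 1 == 0))
          = (PySem.List.pyRange (i + 1) n 1).filter (fun i => s.testBit i.toNat) := by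
        apply List.filter_congr
        intro x _
        exact pvBit_eq s x.toNat
      rw [hfilter, ← hrest]
      exact pvFoldl_mid
        (f1 := fun c j => c + (if PySem.List.pyGetD (PySem.List.pyGetD dist i []) j 0 = 1 then 1 else 0))
        (f2 := fun m j => max m (PySem.List.pyGetD (PySem.List.pyGetD dist i []) j 0)) _ c' cc' m'
    rw [hinner c (cc + 1) m]
    rw [ih (i + 1) hrest _ _ _]
    simp [pvPairScan]
    omega

-- pointwise: A's per-state update, as a function of the pair scan over the member list
theorem pvStep_eq (n : Int) (dist : List (List Int)) (s : Nat) (ans : List Int) :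
    (let d := pvMaxDistance n dist (s : Int)
     if d > 0 then PySem.List.pySetD ans (d - 1) (PySem.List.pyGetD ans (d - 1) 0 + 1) else ans)
    = (let r := pvPairScan dist (pvMembers n s) (0, 0)
       if r.1 = ((pvMembers n s).length : Int) - 1 ∧ r.2 > 0 then
         PySem.List.pySetD ans (r.2 - 1) (PySem.List.pyGetD ans (r.2 - 1) 0 + 1)
       else ans) := by
  have houter : pvMaxDistance n dist (s : Int)
      = (if (pvPairScan dist (pvMembers n s) (0, 0)).1 ≠ (0 + ((pvMembers n s).length : Int)) - 1
         then 0 else (pvPairScan dist (pvMembers n s) (0, 0)).2) := by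
    unfold pvMaxDistance
    rw [Int.toNat_natCast]
    rw [pvFoldl_skip]
    have hfilter : (PySem.List.pyRange 0 n 1).filter (fun x => !((s >>> x.toNat) &&& 1 == 0))
        = pvMembers n s := by
      apply List.filter_congr
      intro x _
      exact pvBit_eq s x.toNat
    rw [hfilter]
    rw [pvScan_eq n dist s (pvMembers n s) 0 rfl 0 0 0]
  rw [houter]
  by_cases h1 : (pvPairScan dist (pvMembers n s) (0, 0)).1 = ((pvMembers n s).length : Int) - 1
  · by_cases h2 : (pvPairScan dist (pvMembers n s) (0, 0)).2 > 0 <;> simp [h1, h2]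
  · simp [h1]

theorem pvMembers_eq (n : Int) (s : Nat) :
    pvMembers n s = ((List.range n.toNat).filter s.testBit).map (fun k => (k : Int)) := by
  unfold pvMembers
  rw [PySem.List.pyRange_one, List.filter_map]
  rw [List.filter_congr (l := List.range (n - 0).toNat)
    (q := s.testBit) (by intro x _; simp [Function.comp])]
  simp
  exact List.map_eq_flatMap

theorem pvStep_zero (n : Int) (dist : List (List Int)) (ans : List Int) :
    (let d := pvMaxDistance n dist (0 : Int)
     if d > 0 then PySem.List.pySetD ans (d - 1) (PySem.List.pyGetD ans (d - 1) 0 + 1) else ans) = ans := by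
  have h : pvMaxDistance n dist (0 : Int) = 0 := by
    unfold pvMaxDistance
    rw [PySem.List.foldl_congr_mem _ _ (fun acc _ => acc) _ (by intro acc x _; simp)]
    rw [PySem.List.foldl_ignore]
    norm_num
  simp [h]

-- ---- B-side: pair-list semantics of the incremental accumulators ----

-- the single pair step both programs perform, in B's if-form
def pvF (dist : List (List Int)) (p : Int × Int) (q : Int × Int) : Int × Int :=
  (p.1 + (if PySem.List.pyGetD (PySem.List.pyGetD dist q.1 []) q.2 0 = 1 then 1 else 0),
   if PySem.List.pyGetD (PySem.List.pyGetD dist q.1 []) q.2 0 > p.2 then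
     PySem.List.pyGetD (PySem.List.pyGetD dist q.1 []) q.2 0 else p.2)

-- pair lists of an ascending member list: A's order (each head against its tail, head first)
def pvLex : List Int → List (Int × Int)
  | [] => []
  | i :: ms => ms.map (fun j => (i, j)) ++ pvLex ms

-- and B's order (each head against its tail, tail's pairs first)
def pvRev : List Int → List (Int × Int)
  | [] => []
  | i :: ms => pvRev ms ++ ms.map (fun j => (i, j))

theorem pvRev_perm (l : List Int) : (pvRev l).Perm (pvLex l) := by
  induction l with
  | nil => exact List.Perm.refl _
  | cons i ms ih =>
    exact List.perm_append_comm.trans (ih.append_left _)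

theorem pvMax_if (m d : Int) : max m d = if d > m then d else m := by
  rw [Int.max_def]
  split_ifs <;> omega

theorem pvF_comm (dist : List (List Int)) : ∀ (p : Int × Int) (a b : Int × Int),
    pvF dist (pvF dist p a) b = pvF dist (pvF dist p b) a := by
  intro p a b
  simp only [pvF, Prod.mk.injEq]
  constructor
  · omega
  · split_ifs <;> omega

theorem pvFoldl_perm (dist : List (List Int)) {l₁ l₂ : List (Int × Int)} (h : l₁.Perm l₂)
    (acc : Int × Int) : l₁.foldl (pvF dist) acc = l₂.foldl (pvF dist) acc :=
  h.foldl_eq' (fun x _ y _ z => pvF_comm dist z x y) acc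

-- A's per-vertex row scan (max-form) as a fold of pvF over the row's pairs
theorem pvRowA_eq (dist : List (List Int)) (v : Int) (ch : List Int) (acc : Int × Int) :
    ch.foldl (fun (p : Int × Int) j =>
      (p.1 + (if PySem.List.pyGetD (PySem.List.pyGetD dist v []) j 0 = 1 then 1 else 0),
       max p.2 (PySem.List.pyGetD (PySem.List.pyGetD dist v []) j 0))) acc
    = (ch.map (fun j => (v, j))).foldl (pvF dist) acc := by
  induction ch generalizing acc with
  | nil => rfl
  | cons j ch ih =>
    rw [List.map_cons, List.foldl_cons, List.foldl_cons, ← ih]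
    congr 1
    simp [pvF, pvMax_if]

-- A's pair scan = fold of pvF over the lex pair list
theorem pvPairScan_eq (dist : List (List Int)) : ∀ (ms : List Int) (acc : Int × Int),
    pvPairScan dist ms acc = (pvLex ms).foldl (pvF dist) acc := by
  intro ms
  induction ms with
  | nil => intro acc; rfl
  | cons i rest ih =>
    intro acc
    show pvPairScan dist rest _ = _
    rw [ih, pvLex, List.foldl_append, pvRowA_eq]

-- B's per-vertex row scan = fold of pvF over the row's pairs
theorem pvRow_eq (dist : List (List Int)) (v : Int) (ch : List Int) (acc : Int × Int) :
    ch.foldl (fun (p : Int × Int) j =>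
      (p.1 + (if PySem.List.pyGetD (PySem.List.pyGetD dist v []) j 0 = 1 then 1 else 0),
       if PySem.List.pyGetD (PySem.List.pyGetD dist v []) j 0 > p.2 then
         PySem.List.pyGetD (PySem.List.pyGetD dist v []) j 0 else p.2)) acc
    = (ch.map (fun j => (v, j))).foldl (pvF dist) acc := by
  rw [List.foldl_map]
  rfl

-- accumulated (e, m) after including the whole ascending list ms on top of chosen ch
def pvAdd (dist : List (List Int)) : List Int → List Int → Int × Int → Int × Int
  | [], _, acc => acc
  | v :: ms, ch, acc =>
      ((ms ++ ch).map (fun j => (v, j))).foldl (pvF dist) (pvAdd dist ms ch acc)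

theorem pvAdd_shift (dist : List (List Int)) (V : Int) :
    ∀ (ms ch : List Int) (acc : Int × Int),
    pvAdd dist (ms ++ [V]) ch acc
      = pvAdd dist ms (V :: ch) ((ch.map (fun j => (V, j))).foldl (pvF dist) acc) := by
  intro ms
  induction ms with
  | nil => intro ch acc; simp [pvAdd]
  | cons v ms ih =>
    intro ch acc
    show ((ms ++ [V] ++ ch).map _).foldl _ (pvAdd dist (ms ++ [V]) ch acc) = _
    rw [ih, List.append_assoc, List.singleton_append]
    rfl

theorem pvAdd_nil_eq (dist : List (List Int)) : ∀ (ms : List Int) (acc : Int × Int),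
    pvAdd dist ms [] acc = (pvRev ms).foldl (pvF dist) acc := by
  intro ms
  induction ms with
  | nil => intro acc; rfl
  | cons v ms ih =>
    intro acc
    show ((ms ++ []).map _).foldl _ (pvAdd dist ms [] acc) = _
    rw [ih, pvRev, List.foldl_append, List.append_nil]

-- ---- subset enumeration ----

def pvSubs (V : Nat) : List (List Int) :=
  (List.range (2 ^ V)).map (fun s => ((List.range V).filter s.testBit).map (fun k => (k : Int)))

theorem pvSubs_succ (V : Nat) :
    pvSubs (V + 1) = pvSubs V ++ (pvSubs V).map (fun ms => ms ++ [(V : Int)]) := by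
  have h2 : (2 : Nat) ^ (V + 1) = 2 ^ V + 2 ^ V := by
    have := pow_succ 2 V; omega
  have hsplit : List.range (2 ^ (V + 1))
      = List.range (2 ^ V) ++ (List.range (2 ^ V)).map (2 ^ V + ·) := by
    rw [h2, List.range_add]
  unfold pvSubs
  rw [hsplit, List.map_append, List.map_map, List.map_map]
  congr 1
  · apply List.map_congr_left
    intro s hs
    have hs' : s < 2 ^ V := List.mem_range.mp hs
    rw [List.range_succ, List.filter_append]
    simp [Nat.testBit_lt_two_pow hs']
  · apply List.map_congr_left
    intro s hs
    have hs' : s < 2 ^ V := List.mem_range.mp hs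
    have hlow : (List.range V).filter (2 ^ V + s).testBit = (List.range V).filter s.testBit :=
      List.filter_congr (fun i hi => by rw [Nat.testBit_two_pow_add_gt (List.mem_range.mp hi)])
    have hhigh : (2 ^ V + s).testBit V = true := by
      rw [Nat.testBit_two_pow_add_eq, Nat.testBit_lt_two_pow hs']; rfl
    simp only [Function.comp_apply, List.range_succ, List.filter_append, hlow, hhigh,
      List.filter_cons, List.filter_nil]
    simp

-- per-subset update performed at a leaf of pvGo
def pvStepB (dist : List (List Int)) (ch : List Int) (e m : Int) (ans : List Int) (ms : List Int) : List Int :=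
  let r := pvAdd dist ms ch (e, m)
  if r.2 > 0 ∧ r.1 = ((ms ++ ch).length : Int) - 1 then
    PySem.List.pySetD ans (r.2 - 1) (PySem.List.pyGetD ans (r.2 - 1) 0 + 1)
  else ans

theorem pvGo_eq (dist : List (List Int)) : ∀ (V : Nat) (ch : List Int) (e m : Int) (ans : List Int),
    pvGo dist V ch e m ans = (pvSubs V).foldl (pvStepB dist ch e m) ans := by
  intro V
  induction V with
  | zero =>
    intro ch e m ans
    show (if m > 0 ∧ e = (ch.length : Int) - 1 then _ else _) = _
    simp [pvSubs, pvStepB, pvAdd]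
  | succ V ih =>
    intro ch e m ans
    show pvGo dist V ((V : Int) :: ch) _ _ (pvGo dist V ch e m ans) = _
    rw [ih, ih, pvSubs_succ, List.foldl_append, List.foldl_map]
    apply PySem.List.foldl_congr_mem
    intro a ms _
    show pvStepB dist ((V : Int) :: ch) _ _ a ms = pvStepB dist ch e m a (ms ++ [(V : Int)])
    unfold pvStepB
    rw [pvAdd_shift, ← pvRow_eq, List.append_assoc, List.singleton_append]

theorem pvMain (n : Int) (dist : List (List Int)) (ans0 : List Int) :
    (PySem.List.pyRange 1 ((2 : Int) ^ n.toNat) 1).foldl (fun ans state =>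
      let d := pvMaxDistance n dist state
      if d > 0 then PySem.List.pySetD ans (d - 1) (PySem.List.pyGetD ans (d - 1) 0 + 1) else ans) ans0
    = pvGo dist n.toNat [] 0 0 ans0 := by
  have hpos : (0 : Int) < (2 : Int) ^ n.toNat := by positivity
  have hcons : PySem.List.pyRange 0 ((2 : Int) ^ n.toNat) 1
      = 0 :: PySem.List.pyRange 1 ((2 : Int) ^ n.toNat) 1 := PySem.List.pyRange_one_cons hpos
  have hL := congrArg (fun l => List.foldl (fun ans state =>
      let d := pvMaxDistance n dist state
      if d > 0 then PySem.List.pySetD ans (d - 1) (PySem.List.pyGetD ans (d - 1) 0 + 1) else ans) ans0 l) hcons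
  simp only [List.foldl_cons] at hL
  rw [pvStep_zero] at hL
  rw [← hL]
  have hMN : (((2 : Int) ^ n.toNat) - 0).toNat = 2 ^ n.toNat := by
    rw [sub_zero, show ((2 : Int) ^ n.toNat) = ((2 ^ n.toNat : Nat) : Int) by push_cast; ring]
    exact Int.toNat_natCast _
  rw [PySem.List.pyRange_one 0 ((2 : Int) ^ n.toNat), hMN, List.foldl_map]
  rw [pvGo_eq, pvSubs, List.foldl_map]
  apply PySem.List.foldl_congr_mem
  intro ans s _
  simp only [zero_add]
  refine (pvStep_eq n dist s ans).trans ?_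
  have hadd : pvAdd dist (pvMembers n s) [] (0, 0) = pvPairScan dist (pvMembers n s) (0, 0) := by
    rw [pvAdd_nil_eq, pvPairScan_eq]
    exact pvFoldl_perm dist (pvRev_perm _) _
  rw [pvMembers_eq] at hadd
  rw [pvMembers_eq]
  unfold pvStepB
  simp only [hadd, List.append_nil]
  exact if_congr (Iff.intro (fun h => ⟨h.2, h.1⟩) (fun h => ⟨h.2, h.1⟩)) rfl rfl

-- ===== VERDICT (by name: the statement is the Claim_ definition above) =====
theorem countSubgraphsForEachDiameter_spec : Claim_equal_countSubgraphsForEachDiameter := by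
  intro n edges _ _
  unfold Spec_countSubgraphsForEachDiameter
  simp only [countSubgraphsForEachDiameter, countSubgraphsForEachDiameter_alt, ← pvDist_eq]
  exact pvMain n (pvDistA n edges) _
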